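-- pv_equiv track=rewrite | github.com/hyeonjun/AlgorithmTest | Algorithm_Study/Algorithm_Type/Search_Advenced_MainType.py | solution
-- ===== SOURCE A (Python) =====
-- def solution(cards):
--     import heapq
--     heap = []
--     for i in cards:
--         heapq.heappush(heap, i)
--
--     answer = 0
--     while len(heap) != 1:
--         sumV = heapq.heappop(heap) + heapq.heappop(heap)
--         answer += sumV
--         heapq.heappush(heap, sumV)
--     return answer
-- ===== SOURCE B (Python) =====
-- def pop_min(q1, q2):
--     # both queues are nondecreasing, so the overall minimum is one of the heads
--     if q2 and (not q1 or q2[0] <= q1[0]):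
--         return q2[0], q1, q2[1:]
--     return q1[0], q1[1:], q2
--
--
-- def solution(cards):
--     # Two-queue Huffman merge: q1 = the sorted cards, q2 = FIFO of produced sums.
--     # The sums that are simultaneously alive are nondecreasing, so q2 needs no
--     # priority maintenance: each round pops the two smallest among the heads of
--     # q1 and q2 and appends their sum to the back of q2.
--     q1 = sorted(cards)
--     q2 = []
--     answer = 0
--     for _ in range(len(cards) - 1):
--         a, q1, q2 = pop_min(q1, q2)
--         b, q1, q2 = pop_min(q1, q2)
--         answer += a + b
--         q2.append(a + b)
--     return answer
-- ===== Notes on version B (the rewrite author's own statement) =====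
-- stated objective: alternative
-- what changed: Replaces the binary heap with the classic two-queue Huffman merge: the cards are sorted once into one FIFO, produced sums go to the back of a second plain FIFO, and each round pops the two smallest values from the queue heads; no priority structure is maintained at all, correctness resting on the (proved) invariant that the live sums stay nondecreasing.
import Mathlib
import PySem

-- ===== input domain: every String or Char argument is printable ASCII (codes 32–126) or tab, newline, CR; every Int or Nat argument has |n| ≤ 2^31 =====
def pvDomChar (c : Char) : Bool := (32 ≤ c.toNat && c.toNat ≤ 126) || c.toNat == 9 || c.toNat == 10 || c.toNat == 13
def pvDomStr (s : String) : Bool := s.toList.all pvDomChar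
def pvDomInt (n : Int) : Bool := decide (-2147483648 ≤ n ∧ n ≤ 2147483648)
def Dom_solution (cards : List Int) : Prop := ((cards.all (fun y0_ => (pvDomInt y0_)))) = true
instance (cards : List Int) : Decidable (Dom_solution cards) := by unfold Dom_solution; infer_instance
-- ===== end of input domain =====

-- B replaces A's binary heap by the two-queue Huffman merge: sort once, then keep the
-- produced sums in a plain FIFO (no priority structure at all); objective: alternative.

-- ===== PORT A =====
-- A's heap holds plain Ints, and the only operations are heappush and heappop (pop a
-- minimum). Since equal Ints are indistinguishable, the heap is observationally the
-- multiset of its elements: we model it as a List Int where heappush conses and heappop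
-- removes one occurrence of the minimum (min? + erase). This is exact for the returned
-- value on every input. The while-loop is fuel recursion; fuel = cards.length suffices
-- (each round shrinks the pool by one and the loop stops at length 1); on the empty
-- input Python A raises IndexError, which Pre_solution excludes.
def solutionLoopA : Nat → List Int → Int → Int
  | 0, _, answer => answer
  | fuel + 1, heap, answer =>
    if heap.length = 1 then answer
    else
      match heap.min? with
      | none => answer
      | some m1 =>
        let h1 := heap.erase m1
        match h1.min? with
        | none => answer
        | some m2 =>
          let sumV := m1 + m2
          solutionLoopA fuel (sumV :: h1.erase m2) (answer + sumV)

def solution (cards : List Int) : Int :=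
  -- 'for i in cards: heappush(heap, i)' builds a heap containing exactly the cards
  solutionLoopA cards.length cards 0

-- ===== PORT B =====
-- Source B's pop_min: both queues are nondecreasing, so the overall minimum is one of the
-- heads. The ([],[]) case is unreachable inside the loop (the pool holds ≥ 2 elements
-- at the start of each of the n-1 rounds); Python would raise IndexError there.
def popMin : List Int → List Int → Int × List Int × List Int
  | [], [] => (0, [], [])
  | [], q :: q2 => (q, [], q2)
  | x :: q1, [] => (x, q1, [])
  | x :: q1, q :: q2 => if q ≤ x then (q, x :: q1, q2) else (x, q1, q :: q2)

-- 'for _ in range(len(cards)-1)' with state (q1, q2, answer)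
def solutionLoopB : Nat → List Int → List Int → Int → Int
  | 0, _, _, answer => answer
  | fuel + 1, q1, q2, answer =>
    let p1 := popMin q1 q2
    let p2 := popMin p1.2.1 p1.2.2
    let s := p1.1 + p2.1
    solutionLoopB fuel p2.2.1 (p2.2.2 ++ [s]) (answer + s)

def solution_alt (cards : List Int) : Int :=
  solutionLoopB (cards.length - 1) (PySem.List.sorted cards (fun x => x)) [] 0

-- ===== PRECONDITION & SPEC =====
-- Pre_ excludes only the empty list, on which A raises IndexError (heappop of an empty heap).
def Pre_solution (cards : List Int) : Prop := cards ≠ []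
instance (cards : List Int) : Decidable (Pre_solution cards) := by unfold Pre_solution; infer_instance
def pvWitness_solution : List Int := [10, 20, 40]

def Spec_solution (cards : List Int) (out : Int) : Prop := out = solution_alt cards
instance (cards : List Int) (out : Int) : Decidable (Spec_solution cards out) := by unfold Spec_solution; infer_instance

-- ===== CLAIM (what is proved, stated in full; the proofs are below) =====
def Claim_equal_solution : Prop := ∀ (cards : List Int), Dom_solution cards → Pre_solution cards → Spec_solution cards (solution cards)
-- ===== LEMMAS AND PROOFS =====

-- Removing one occurrence of a value from the right part of an append, up to permutation.
lemma perm_append_erase (l₁ : List Int) {l₂ : List Int} {a : Int} (h : a ∈ l₂) :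
    ((l₁ ++ l₂).erase a).Perm (l₁ ++ l₂.erase a) := by
  induction l₁ with
  | nil => simp
  | cons x l₁ ih =>
    by_cases hx : x = a
    · subst hx
      simp only [List.cons_append, List.erase_cons_head]
      exact (((List.perm_cons_erase h).append_left l₁).trans List.perm_middle)
    · have e : ((x :: (l₁ ++ l₂)).erase a) = x :: ((l₁ ++ l₂).erase a) :=
        List.erase_cons_tail (by simpa using hx)
      simp only [List.cons_append, e]
      exact ih.cons x

-- Removing one occurrence of a value below a cons, up to permutation.
lemma perm_erase_cons (x a : Int) {t : List Int} (h : a ∈ t) :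
    ((x :: t).erase a).Perm (x :: t.erase a) := by
  simpa using perm_append_erase [x] h

-- min? only depends on the multiset.
lemma min?_of_perm {l l' : List Int} (p : l.Perm l') : l.min? = l'.min? := by
  rcases hl : l'.min? with _ | m
  · rw [List.min?_eq_none_iff] at hl
    subst hl
    rw [p.eq_nil]
    rfl
  · rw [List.min?_eq_some_iff_subtype] at hl ⊢
    exact ⟨p.mem_iff.mpr hl.1, fun b hb => hl.2 b (p.mem_iff.mp hb)⟩

-- What popMin returns when the two queues are sorted: the minimum value of the pool,
-- and the rest of the pool (as a permutation); the remainders are tails of the inputs.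
-- min? from a membership and a lower bound / and back.
lemma min?_intro {t : List Int} {m : Int} (hm : m ∈ t) (hle : ∀ y ∈ t, m ≤ y) :
    t.min? = some m := by
  rw [List.min?_eq_some_iff_subtype]; exact ⟨hm, hle⟩

lemma min?_mem' {t : List Int} {m : Int} (h : t.min? = some m) : m ∈ t :=
  (List.min?_eq_some_iff_subtype.mp h).1

lemma min?_le' {t : List Int} {m : Int} (h : t.min? = some m) : ∀ y ∈ t, m ≤ y :=
  (List.min?_eq_some_iff_subtype.mp h).2

-- What popMin returns when the two queues are sorted: the minimum value of the pool,
-- and the rest of the pool (as a permutation); the remainders are tails of the inputs.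
lemma popMin_spec {q1 q2 : List Int} (h1 : q1.Pairwise (· ≤ ·)) (h2 : q2.Pairwise (· ≤ ·))
    (hne : q1 ++ q2 ≠ []) :
    (q1 ++ q2).min? = some (popMin q1 q2).1 ∧
    ((popMin q1 q2).1 :: ((popMin q1 q2).2.1 ++ (popMin q1 q2).2.2)).Perm (q1 ++ q2) ∧
    (popMin q1 q2).2.1.Sublist q1 ∧ (popMin q1 q2).2.2.Sublist q2 ∧
    (popMin q1 q2).2.1.Pairwise (· ≤ ·) ∧ (popMin q1 q2).2.2.Pairwise (· ≤ ·) := by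
  match q1, q2 with
  | [], [] => exact absurd rfl hne
  | [], q :: q2 =>
    have hp : popMin [] (q :: q2) = (q, [], q2) := rfl
    rw [hp]
    refine ⟨min?_intro (by simp) ?_, by simp, by simp, by simp, by simp,
      (List.pairwise_cons.mp h2).2⟩
    intro y hy
    rcases List.mem_cons.mp (by simpa using hy) with rfl | hy'
    · exact le_refl y
    · exact (List.pairwise_cons.mp h2).1 y hy'
  | x :: q1, [] =>
    have hp : popMin (x :: q1) [] = (x, q1, []) := rfl
    rw [hp]
    refine ⟨min?_intro (by simp) ?_, by simp, by simp, by simp,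
      (List.pairwise_cons.mp h1).2, by simp⟩
    intro y hy
    rcases List.mem_cons.mp (by simpa using hy) with rfl | hy'
    · exact le_refl y
    · exact (List.pairwise_cons.mp h1).1 y hy'
  | x :: q1, q :: q2 =>
    by_cases hqx : q ≤ x
    · have hp : popMin (x :: q1) (q :: q2) = (q, x :: q1, q2) := by
        simp [popMin, hqx]
      rw [hp]
      refine ⟨min?_intro (by simp) ?_, List.perm_middle.symm, by simp,
        (List.sublist_cons_self q q2), h1, (List.pairwise_cons.mp h2).2⟩
      intro y hy
      rcases List.mem_append.mp hy with hy' | hy'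
      · rcases List.mem_cons.mp hy' with rfl | hy''
        · exact hqx
        · exact le_trans hqx ((List.pairwise_cons.mp h1).1 y hy'')
      · rcases List.mem_cons.mp hy' with rfl | hy''
        · exact le_refl y
        · exact (List.pairwise_cons.mp h2).1 y hy''
    · have hxq : x ≤ q := le_of_not_ge hqx
      have hp : popMin (x :: q1) (q :: q2) = (x, q1, q :: q2) := by
        simp [popMin, hqx]
      rw [hp]
      refine ⟨min?_intro (by simp) ?_, by simp, List.sublist_cons_self x q1, by simp,
        (List.pairwise_cons.mp h1).2, h2⟩
      intro y hy
      rcases List.mem_append.mp hy with hy' | hy'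
      · rcases List.mem_cons.mp hy' with rfl | hy''
        · exact le_refl y
        · exact (List.pairwise_cons.mp h1).1 y hy''
      · rcases List.mem_cons.mp hy' with rfl | hy''
        · exact hxq
        · exact le_trans hxq ((List.pairwise_cons.mp h2).1 y hy'')

-- Removing the last element, up to permutation.
lemma erase_append_last (l : List Int) (x : Int) : ((l ++ [x]).erase x).Perm l := by
  by_cases hx : x ∈ l
  · rw [List.erase_append_left _ hx]
    have p1 : ((l.erase x) ++ [x]).Perm (x :: (l.erase x ++ [])) := List.perm_middle
    exact p1.trans (by simpa using (List.perm_cons_erase hx).symm)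
  · rw [List.erase_append_right _ hx]
    simp

-- Bound invariant: every live sum is at most the sum of the two smallest elements of the
-- rest of the pool.
def Bnd (q : Int) (t : List Int) : Prop :=
  ∀ m1 m2 : Int, t.min? = some m1 → (t.erase m1).min? = some m2 → q ≤ m1 + m2

-- Core lemma: if (q1, q2) is a two-queue arrangement of A's pool h satisfying the
-- invariant, the two loops agree.
lemma loopA_eq_loopB (fuel : Nat) : ∀ (q1 q2 h : List Int) (ans : Int),
    q1.Pairwise (· ≤ ·) → q2.Pairwise (· ≤ ·) →
    (∀ q ∈ q2, Bnd q (q1 ++ q2.erase q)) →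
    (q1 ++ q2).Perm h → h.length = fuel + 1 →
    solutionLoopA (fuel + 1) h ans = solutionLoopB fuel q1 q2 ans := by
  induction fuel with
  | zero =>
    intro q1 q2 h ans _ _ _ _ hlen
    simp [solutionLoopA, solutionLoopB, hlen]
  | succ fuel ih =>
    intro q1 q2 h ans hs1 hs2 hB hP hlen
    have hne : q1 ++ q2 ≠ [] := by
      intro hnil
      have hl := hP.length_eq
      rw [hnil, hlen] at hl
      simp at hl
    have hspec1 := popMin_spec hs1 hs2 hne
    rcases hpm1 : popMin q1 q2 with ⟨a, r1, r2⟩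
    rw [hpm1] at hspec1
    dsimp only at hspec1
    obtain ⟨hmin1, hperm1, hsub1, hsub2, hr1s, hr2s⟩ := hspec1
    have hhmin : h.min? = some a := by rw [← min?_of_perm hP]; exact hmin1
    have haMem : a ∈ h := hP.subset (hperm1.subset List.mem_cons_self)
    have hpermT : (r1 ++ r2).Perm (h.erase a) := by
      have e := (hperm1.trans hP).erase a
      simpa [List.erase_cons_head] using e
    have hlenT : (h.erase a).length = fuel + 1 := by
      simp [List.length_erase_of_mem haMem, hlen]
    have hTne : r1 ++ r2 ≠ [] := by
      intro hnil
      have hl := hpermT.length_eq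
      rw [hnil, hlenT] at hl
      simp at hl
    have hspec2 := popMin_spec hr1s hr2s hTne
    rcases hpm2 : popMin r1 r2 with ⟨b, r1', r2'⟩
    rw [hpm2] at hspec2
    dsimp only at hspec2
    obtain ⟨hmin2, hperm2, hsub1', hsub2', hr1s', hr2s'⟩ := hspec2
    have hh1min : (h.erase a).min? = some b := by rw [← min?_of_perm hpermT]; exact hmin2
    have hbMemT : b ∈ r1 ++ r2 := min?_mem' hmin2
    have hbMemQ : b ∈ q1 ++ q2 := hperm1.subset (List.mem_cons_of_mem a hbMemT)
    have hab : a ≤ b := min?_le' hmin1 b hbMemQ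
    have haLB : ∀ y ∈ q1 ++ q2, a ≤ y := min?_le' hmin1
    have hTge : ∀ y ∈ r1 ++ r2, b ≤ y := min?_le' hmin2
    have hTsub : ∀ y ∈ r1' ++ r2', y ∈ r1 ++ r2 := fun y hy =>
      hperm2.subset (List.mem_cons_of_mem b hy)
    -- the live sums are bounded by the sum of the two popped minima
    have hqBound : ∀ q ∈ r2', q ≤ a + b := by
      intro q hq
      have hqR2 : q ∈ r2 := hsub2'.subset hq
      have hqQ2 : q ∈ q2 := hsub2.subset hqR2
      have hqT' : q ∈ r1' ++ r2' := List.mem_append.mpr (Or.inr hq)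
      have hqT : q ∈ r1 ++ r2 := hTsub q hqT'
      have hpool : (q1 ++ q2.erase q).Perm (a :: b :: ((r1' ++ r2').erase q)) := by
        have e1 : (q1 ++ q2.erase q).Perm ((q1 ++ q2).erase q) := (perm_append_erase q1 hqQ2).symm
        have e2 : ((q1 ++ q2).erase q).Perm ((a :: (r1 ++ r2)).erase q) := (hperm1.erase q).symm
        have e3 : ((a :: (r1 ++ r2)).erase q).Perm (a :: ((r1 ++ r2).erase q)) :=
          perm_erase_cons a q hqT
        have e4 : ((r1 ++ r2).erase q).Perm ((b :: (r1' ++ r2')).erase q) := (hperm2.erase q).symm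
        have e5 : ((b :: (r1' ++ r2')).erase q).Perm (b :: ((r1' ++ r2').erase q)) :=
          perm_erase_cons b q hqT'
        exact e1.trans (e2.trans (e3.trans ((e4.trans e5).cons a)))
      have hEsub : ∀ y ∈ (r1' ++ r2').erase q, y ∈ q1 ++ q2 := fun y hy =>
        hperm1.subset (List.mem_cons_of_mem a
          (hperm2.subset (List.mem_cons_of_mem b (List.erase_subset hy))))
      have hm1 : (q1 ++ q2.erase q).min? = some a := by
        rw [min?_of_perm hpool]
        refine min?_intro (by simp) ?_
        intro y hy
        rcases List.mem_cons.mp hy with rfl | hy1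
        · exact le_refl y
        rcases List.mem_cons.mp hy1 with rfl | hy2
        · exact hab
        · exact haLB y (hEsub y hy2)
      have hm2 : ((q1 ++ q2.erase q).erase a).min? = some b := by
        have e : ((q1 ++ q2.erase q).erase a).Perm (b :: ((r1' ++ r2').erase q)) := by
          have e' := hpool.erase a
          simpa [List.erase_cons_head] using e'
        rw [min?_of_perm e]
        refine min?_intro (by simp) ?_
        intro y hy
        rcases List.mem_cons.mp hy with rfl | hy2
        · exact le_refl y
        · exact hTge y (hTsub y (List.erase_subset hy2))
      exact hB q hqQ2 a b hm1 hm2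
    -- sortedness of the new sum queue
    have hs2n : (r2' ++ [a + b]).Pairwise (· ≤ ·) := by
      rw [List.pairwise_append]
      exact ⟨hr2s', by simp, fun q hq y hy => (List.mem_singleton.mp hy) ▸ hqBound q hq⟩
    -- the new pool
    have hbMemE : b ∈ h.erase a := min?_mem' hh1min
    have hPn : (r1' ++ (r2' ++ [a + b])).Perm ((a + b) :: (h.erase a).erase b) := by
      have e0 : (r1' ++ (r2' ++ [a + b])).Perm ((a + b) :: (r1' ++ r2')) := by
        have e' : ((r1' ++ r2') ++ [a + b]).Perm ((a + b) :: ((r1' ++ r2') ++ [])) :=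
          List.perm_middle
        simpa [List.append_assoc] using e'
      have e1 : (r1' ++ r2').Perm ((h.erase a).erase b) := by
        have e' := (hperm2.trans hpermT).erase b
        simpa [List.erase_cons_head] using e'
      exact e0.trans (e1.cons (a + b))
    have hlenn : ((a + b) :: (h.erase a).erase b).length = fuel + 1 := by
      simp [List.length_erase_of_mem hbMemE, hlenT]
    -- the new bound invariant
    have hBn : ∀ q ∈ r2' ++ [a + b], Bnd q (r1' ++ (r2' ++ [a + b]).erase q) := by
      intro q hq
      rcases List.mem_append.mp hq with hq2 | hqs
      · -- q is an old live sum
        have hqs' : q ≤ a + b := hqBound q hq2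
        have hqa : a ≤ q :=
          haLB q (List.mem_append.mpr (Or.inr (hsub2.subset (hsub2'.subset hq2))))
        have hb0 : (0 : Int) ≤ b := by linarith
        intro m1 m2 hm1 hm2
        have hpool : (r1' ++ (r2' ++ [a + b]).erase q).Perm ((a + b) :: ((r1' ++ r2').erase q)) := by
          rw [List.erase_append_left _ hq2]
          have e0 : (r1' ++ (r2'.erase q ++ [a + b])).Perm ((a + b) :: (r1' ++ r2'.erase q)) := by
            have e' : ((r1' ++ r2'.erase q) ++ [a + b]).Perm
                ((a + b) :: ((r1' ++ r2'.erase q) ++ [])) := List.perm_middle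
            simpa [List.append_assoc] using e'
          have e1 : (r1' ++ r2'.erase q).Perm ((r1' ++ r2').erase q) :=
            (perm_append_erase r1' hq2).symm
          exact e0.trans (e1.cons (a + b))
        have hUge : ∀ y ∈ (r1' ++ r2').erase q, b ≤ y := fun y hy =>
          hTge y (hTsub y (List.erase_subset hy))
        have hm1' : ((a + b) :: ((r1' ++ r2').erase q)).min? = some m1 := by
          rw [← min?_of_perm hpool]; exact hm1
        rcases List.mem_cons.mp (min?_mem' hm1') with rfl | hm1U
        · -- the first minimum is the fresh sum
          have hperE : ((r1' ++ (r2' ++ [a + b]).erase q).erase (a + b)).Perm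
              ((r1' ++ r2').erase q) := by
            have e' := hpool.erase (a + b)
            simpa [List.erase_cons_head] using e'
          have hm2' : ((r1' ++ r2').erase q).min? = some m2 := by
            rw [← min?_of_perm hperE]; exact hm2
          have hbm2 : b ≤ m2 := hUge m2 (min?_mem' hm2')
          linarith
        · have hbm1 : b ≤ m1 := hUge m1 hm1U
          have hperE : ((r1' ++ (r2' ++ [a + b]).erase q).erase m1).Perm
              ((a + b) :: (((r1' ++ r2').erase q).erase m1)) :=
            (hpool.erase m1).trans (perm_erase_cons (a + b) m1 hm1U)
          have hm2' : ((a + b) :: (((r1' ++ r2').erase q).erase m1)).min? = some m2 := by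
            rw [← min?_of_perm hperE]; exact hm2
          rcases List.mem_cons.mp (min?_mem' hm2') with rfl | hm2U
          · linarith
          · have hbm2 : b ≤ m2 := hUge m2 (List.erase_subset hm2U)
            linarith
      · -- q is the fresh sum itself
        have hqv : q = a + b := List.mem_singleton.mp hqs
        subst hqv
        intro m1 m2 hm1 hm2
        have hpool : (r1' ++ (r2' ++ [a + b]).erase (a + b)).Perm (r1' ++ r2') :=
          (erase_append_last r2' (a + b)).append_left r1'
        have hm1' : (r1' ++ r2').min? = some m1 := by rw [← min?_of_perm hpool]; exact hm1
        have hbm1 : b ≤ m1 := hTge m1 (hTsub m1 (min?_mem' hm1'))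
        have hperE : ((r1' ++ (r2' ++ [a + b]).erase (a + b)).erase m1).Perm
            ((r1' ++ r2').erase m1) := hpool.erase m1
        have hm2' : ((r1' ++ r2').erase m1).min? = some m2 := by
          rw [← min?_of_perm hperE]; exact hm2
        have hbm2 : b ≤ m2 := hTge m2 (hTsub m2 (List.erase_subset (min?_mem' hm2')))
        linarith
    -- one step of each loop
    have hlen1 : ¬ h.length = 1 := by rw [hlen]; omega
    have hAstep : solutionLoopA (fuel + 1 + 1) h ans
        = solutionLoopA (fuel + 1) ((a + b) :: (h.erase a).erase b) (ans + (a + b)) := by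
      simp [solutionLoopA, hlen1, hhmin, hh1min]
    have hBstep : solutionLoopB (fuel + 1) q1 q2 ans
        = solutionLoopB fuel r1' (r2' ++ [a + b]) (ans + (a + b)) := by
      simp [solutionLoopB, hpm1, hpm2]
    rw [hAstep, hBstep]
    exact ih r1' (r2' ++ [a + b]) ((a + b) :: (h.erase a).erase b) (ans + (a + b))
      hr1s' hs2n hBn hPn hlenn

-- ===== VERDICT (by name: the statements are the Claim_ definitions above) =====
theorem solution_spec : Claim_equal_solution := by
  intro cards _ hpre
  unfold Spec_solution solution solution_alt
  have hlen : cards.length - 1 + 1 = cards.length := by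
    have : cards.length ≠ 0 := by simpa using hpre
    omega
  have h := loopA_eq_loopB (cards.length - 1) (PySem.List.sorted cards (fun x => x)) [] cards 0
    (PySem.List.sorted_pairwise cards (fun x => x)) (by simp) (by simp)
    (by simpa using PySem.List.sorted_perm cards (fun x => x) false)
    (by simpa using hlen.symm)
  rw [hlen] at h
  exact h
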